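-- pv_equiv track=rewrite | github.com/NLP-Discourse-SoochowU/CASC_monolingual | uccs-gen/llm_model.py | build_data_batch
-- ===== SOURCE A (Python) =====
-- def build_data_batch(prompt_all_num, prompt_all, prompt_count_all, cc_list, total_token_max):
--     batch_idx = 0
--     batch_prompt_all, batch_cc_id_all, batch_cc_all = list(), list(), list()
--     while batch_idx < prompt_all_num:
--         max_len, token_num, batch_size = 0, 0, 1
--         batch_prompt, batch_cc_id, batch_cc = list(), list(), list()
--
--         while token_num < total_token_max and batch_idx < prompt_all_num:
--             max_len = max(max_len, prompt_count_all[batch_idx])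
--             if len(batch_prompt) != 0 and max_len * batch_size > total_token_max:
--                 break
--             token_num = max_len * batch_size
--             # else do something
--             batch_prompt.append(prompt_all[batch_idx])
--             batch_size += 1
--             batch_cc_id.append(batch_idx)
--             batch_cc.append(cc_list[batch_idx])
--             batch_idx += 1
--             if batch_idx == 1:
--                 break  # The first one is too big, do not suggest batch computing
--         batch_prompt_all.append(batch_prompt)
--         batch_cc_id_all.append(batch_cc_id)
--         batch_cc_all.append(batch_cc)
--     return batch_prompt_all, batch_cc_id_all, batch_cc_all
-- ===== SOURCE B (Python) =====
-- def build_data_batch(prompt_all_num, prompt_all, prompt_count_all, cc_list, total_token_max):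
--     # Compute batch SPANS (start, end) first, then materialise the three outputs
--     # by slicing; no per-element appends and no running token_num/batch_size state.
--     def extent(s):
--         # Length of the batch starting at s: the first prompt always enters;
--         # extend while the current load m*k is under budget and the next
--         # prompt's load max(m, c)* (k+1) still fits.
--         m = max(0, prompt_count_all[s])
--         k = 1
--         while s + k < prompt_all_num and m * k < total_token_max:
--             m2 = max(m, prompt_count_all[s + k])
--             if m2 * (k + 1) > total_token_max:
--                 break
--             m = m2
--             k += 1
--         return k
--     spans = []
--     s = 0
--     while s < prompt_all_num:
--         e = s + (1 if s == 0 else extent(s))  # the very first prompt is batched alone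
--         spans.append((s, e))
--         s = e
--     return ([prompt_all[a:b] for a, b in spans],
--             [list(range(a, b)) for a, b in spans],
--             [cc_list[a:b] for a, b in spans])
-- ===== Notes on version B (the rewrite author's own statement) =====
-- stated objective: alternative
-- what changed: B computes batch spans (start,end) in a first phase — a helper returns each batch's length from a prefix-max scan, with the first prompt's solo batch handled at the span level — and then materialises the three outputs by slicing prompt_all/cc_list and range(), instead of A's nested while loops that grow three parallel lists element by element while tracking max_len/token_num/batch_size.
import Mathlib
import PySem

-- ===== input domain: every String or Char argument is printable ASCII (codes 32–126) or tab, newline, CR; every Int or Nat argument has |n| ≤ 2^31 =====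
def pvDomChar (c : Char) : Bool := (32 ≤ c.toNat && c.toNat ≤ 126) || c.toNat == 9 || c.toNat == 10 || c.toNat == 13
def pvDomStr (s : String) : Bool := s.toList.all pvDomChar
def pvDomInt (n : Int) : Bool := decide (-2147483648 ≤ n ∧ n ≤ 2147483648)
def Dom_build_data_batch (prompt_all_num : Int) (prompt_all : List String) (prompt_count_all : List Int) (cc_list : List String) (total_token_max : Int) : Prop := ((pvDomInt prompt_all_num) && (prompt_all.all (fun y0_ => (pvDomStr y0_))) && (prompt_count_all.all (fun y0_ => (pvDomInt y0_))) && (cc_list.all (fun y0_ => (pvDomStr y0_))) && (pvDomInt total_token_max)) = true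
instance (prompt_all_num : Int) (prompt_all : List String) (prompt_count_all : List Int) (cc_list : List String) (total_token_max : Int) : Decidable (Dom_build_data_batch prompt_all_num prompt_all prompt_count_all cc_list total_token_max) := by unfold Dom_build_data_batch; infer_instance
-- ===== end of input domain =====

-- B computes batch spans (start,end) first via a batch-length helper, then materialises the
-- three outputs by slicing; A grows three parallel lists inside nested while loops
-- (objective: alternative decomposition, same asymptotic cost).
-- Both loops are ported with explicit fuel (num.toNat suffices under Pre_, where every
-- batch advances the index by at least one); list indexing is PySem.List.pyGetD, exact
-- under Pre_ where every index is in range.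

-- ===== PORT A =====
-- inner while loop of A: state (i, max_len, token_num, batch_size, batch_prompt, batch_cc_id, batch_cc)
def pvInnerA (pa : List String) (pc : List Int) (cc : List String) (num total : Int) :
    Nat → Int → Int → Int → Int → List String → List Int → List String →
    List String × List Int × List String × Int
  | 0, i, _, _, _, bp, bid, bc => (bp, bid, bc, i)
  | fuel+1, i, maxLen, tokenNum, batchSize, bp, bid, bc =>
    if tokenNum < total ∧ i < num then
      let maxLen' := max maxLen (PySem.List.pyGetD pc i 0)
      if bp.length ≠ 0 ∧ maxLen' * batchSize > total then (bp, bid, bc, i)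
      else
        let tokenNum' := maxLen' * batchSize
        let bp' := bp ++ [PySem.List.pyGetD pa i ""]
        let batchSize' := batchSize + 1
        let bid' := bid ++ [i]
        let bc' := bc ++ [PySem.List.pyGetD cc i ""]
        let i' := i + 1
        if i' = 1 then (bp', bid', bc', i')
        else pvInnerA pa pc cc num total fuel i' maxLen' tokenNum' batchSize' bp' bid' bc'
    else (bp, bid, bc, i)

-- outer while loop of A
def pvOuterA (pa : List String) (pc : List Int) (cc : List String) (num total : Int) :
    Nat → Int → List (List String) → List (List Int) → List (List String) →
    List (List String) × List (List Int) × List (List String)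
  | 0, _, bpa, bia, bca => (bpa, bia, bca)
  | fuel+1, i, bpa, bia, bca =>
    if i < num then
      let r := pvInnerA pa pc cc num total (num.toNat + 1) i 0 0 1 [] [] []
      pvOuterA pa pc cc num total fuel r.2.2.2 (bpa ++ [r.1]) (bia ++ [r.2.1]) (bca ++ [r.2.2.1])
    else (bpa, bia, bca)

def build_data_batch (prompt_all_num : Int) (prompt_all : List String) (prompt_count_all : List Int) (cc_list : List String) (total_token_max : Int) : List (List String) × List (List Int) × List (List String) :=
  pvOuterA prompt_all prompt_count_all cc_list prompt_all_num total_token_max prompt_all_num.toNat 0 [] [] []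

-- ===== PORT B =====
-- B's extent(s): length of the batch starting at s (state: running prefix max m, count k)
def pvExtentB (pc : List Int) (num total : Int) : Nat → Int → Int → Int → Int
  | 0, _, _, k => k
  | fuel+1, s, m, k =>
    if s + k < num ∧ m * k < total then
      let m2 := max m (PySem.List.pyGetD pc (s + k) 0)
      if m2 * (k + 1) > total then k
      else pvExtentB pc num total fuel s m2 (k + 1)
    else k

-- B's span loop: the list of (start, end) pairs
def pvSpansB (pc : List Int) (num total : Int) : Nat → Int → List (Int × Int)
  | 0, _ => []
  | fuel+1, s =>
    if s < num then
      let e := s + (if s = 0 then 1 else pvExtentB pc num total num.toNat s (max 0 (PySem.List.pyGetD pc s 0)) 1)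
      (s, e) :: pvSpansB pc num total fuel e
    else []

def build_data_batch_alt (prompt_all_num : Int) (prompt_all : List String) (prompt_count_all : List Int) (cc_list : List String) (total_token_max : Int) : List (List String) × List (List Int) × List (List String) :=
  let spans := pvSpansB prompt_count_all prompt_all_num total_token_max prompt_all_num.toNat 0
  (spans.map (fun p => PySem.List.slice prompt_all (some p.1) (some p.2)),
   spans.map (fun p => PySem.List.pyRange p.1 p.2 1),
   spans.map (fun p => PySem.List.slice cc_list (some p.1) (some p.2)))

-- ===== PRECONDITION & SPEC =====
-- Pre_ excludes exactly (a) lists shorter than prompt_all_num, where Python A raises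
-- IndexError, and (b) total_token_max ≤ 0 with prompt_all_num > 0, where Python A
-- loops forever (appends empty batches without advancing).
def Pre_build_data_batch (prompt_all_num : Int) (prompt_all : List String) (prompt_count_all : List Int) (cc_list : List String) (total_token_max : Int) : Prop :=
  prompt_all_num ≤ (prompt_all.length : Int) ∧ prompt_all_num ≤ (prompt_count_all.length : Int) ∧
  prompt_all_num ≤ (cc_list.length : Int) ∧ (prompt_all_num ≤ 0 ∨ 0 < total_token_max)
instance (prompt_all_num : Int) (prompt_all : List String) (prompt_count_all : List Int) (cc_list : List String) (total_token_max : Int) : Decidable (Pre_build_data_batch prompt_all_num prompt_all prompt_count_all cc_list total_token_max) := by unfold Pre_build_data_batch; infer_instance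

def pvWitness_build_data_batch : Int × List String × List Int × List String × Int :=
  (3, ["a", "b", "c"], [2, 1, 5], ["x", "y", "z"], 6)

def Spec_build_data_batch (prompt_all_num : Int) (prompt_all : List String) (prompt_count_all : List Int) (cc_list : List String) (total_token_max : Int) (out : List (List String) × List (List Int) × List (List String)) : Prop := out = build_data_batch_alt prompt_all_num prompt_all prompt_count_all cc_list total_token_max
instance (prompt_all_num : Int) (prompt_all : List String) (prompt_count_all : List Int) (cc_list : List String) (total_token_max : Int) (out : List (List String) × List (List Int) × List (List String)) : Decidable (Spec_build_data_batch prompt_all_num prompt_all prompt_count_all cc_list total_token_max out) := by unfold Spec_build_data_batch; infer_instance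

-- ===== CLAIM (what is proved, stated in full; the proofs are below) =====
def Claim_equal_build_data_batch : Prop := ∀ (prompt_all_num : Int) (prompt_all : List String) (prompt_count_all : List Int) (cc_list : List String) (total_token_max : Int), Dom_build_data_batch prompt_all_num prompt_all prompt_count_all cc_list total_token_max → Pre_build_data_batch prompt_all_num prompt_all prompt_count_all cc_list total_token_max → Spec_build_data_batch prompt_all_num prompt_all prompt_count_all cc_list total_token_max (build_data_batch prompt_all_num prompt_all prompt_count_all cc_list total_token_max)

-- ===== LEMMAS AND PROOFS =====

-- the batch length never shrinks
theorem pvExtentB_ge (pc : List Int) (num total : Int) :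
    ∀ (fuel : Nat) (s m k : Int), k ≤ pvExtentB pc num total fuel s m k := by
  intro fuel
  induction fuel with
  | zero => intro s m k; simp [pvExtentB]
  | succ fuel ih =>
    intro s m k
    simp only [pvExtentB]
    split_ifs with h1 h2
    · exact le_refl k
    · exact le_trans (by omega) (ih s (max m (PySem.List.pyGetD pc (s + k) 0)) (k + 1))
    · exact le_refl k

theorem pvExtentB_le (pc : List Int) (num total : Int) :
    ∀ (fuel : Nat) (s m k : Int), s + k ≤ num → s + pvExtentB pc num total fuel s m k ≤ num := by
  intro fuel
  induction fuel with
  | zero => intro s m k h; simpa [pvExtentB] using h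
  | succ fuel ih =>
    intro s m k h
    simp only [pvExtentB]
    split_ifs with h1 h2
    · simpa [pvExtentB] using h
    · exact ih s (max m (PySem.List.pyGetD pc (s + k) 0)) (k + 1) (by omega)
    · simpa [pvExtentB] using h

-- invariant linking A's inner loop to B's extent (batch starting at s ≥ 1, k elements taken)
theorem pvInner_eq (pa : List String) (pc : List Int) (cc : List String) (num total : Int) :
    ∀ (fuel : Nat) (s m k : Int), 1 ≤ s → 1 ≤ k →
    pvInnerA pa pc cc num total fuel (s + k) m (m * k) (k + 1)
      ((PySem.List.pyRange s (s + k) 1).map (fun j => PySem.List.pyGetD pa j ""))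
      (PySem.List.pyRange s (s + k) 1)
      ((PySem.List.pyRange s (s + k) 1).map (fun j => PySem.List.pyGetD cc j ""))
    = ((PySem.List.pyRange s (s + pvExtentB pc num total fuel s m k) 1).map (fun j => PySem.List.pyGetD pa j ""),
       PySem.List.pyRange s (s + pvExtentB pc num total fuel s m k) 1,
       (PySem.List.pyRange s (s + pvExtentB pc num total fuel s m k) 1).map (fun j => PySem.List.pyGetD cc j ""),
       s + pvExtentB pc num total fuel s m k) := by
  intro fuel
  induction fuel with
  | zero => intro s m k hs hk; rfl
  | succ fuel ih =>
    intro s m k hs hk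
    simp only [pvInnerA, pvExtentB]
    by_cases h1 : s + k < num ∧ m * k < total
    · have h1' : m * k < total ∧ s + k < num := ⟨h1.2, h1.1⟩
      rw [if_pos h1', if_pos h1]
      have hlen : ¬ ((PySem.List.pyRange s (s + k) 1).map (fun j => PySem.List.pyGetD pa j "")).length = 0 := by
        simp only [List.length_map, PySem.List.length_pyRange_one]; omega
      by_cases h2 : max m (PySem.List.pyGetD pc (s + k) 0) * (k + 1) > total
      · rw [if_pos ⟨hlen, h2⟩, if_pos h2]
      · rw [if_neg (by simp only [ne_eq, hlen, not_false_iff, true_and]; exact h2), if_neg h2]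
        have hi1 : ¬ (s + k + 1 = 1) := by omega
        rw [if_neg hi1]
        have hrng : PySem.List.pyRange s (s + k) 1 ++ [s + k] = PySem.List.pyRange s (s + (k + 1)) 1 := by
          rw [show s + (k + 1) = (s + k) + 1 by ring]
          exact (PySem.List.pyRange_one_succ_right (by omega)).symm
        have h3 := ih s (max m (PySem.List.pyGetD pc (s + k) 0)) (k + 1) hs (by omega)
        calc pvInnerA pa pc cc num total fuel (s + k + 1) (max m (PySem.List.pyGetD pc (s + k) 0))
              (max m (PySem.List.pyGetD pc (s + k) 0) * (k + 1)) (k + 1 + 1)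
              ((PySem.List.pyRange s (s + k) 1).map (fun j => PySem.List.pyGetD pa j "") ++ [PySem.List.pyGetD pa (s + k) ""])
              (PySem.List.pyRange s (s + k) 1 ++ [s + k])
              ((PySem.List.pyRange s (s + k) 1).map (fun j => PySem.List.pyGetD cc j "") ++ [PySem.List.pyGetD cc (s + k) ""])
            = pvInnerA pa pc cc num total fuel (s + (k + 1)) (max m (PySem.List.pyGetD pc (s + k) 0))
              (max m (PySem.List.pyGetD pc (s + k) 0) * (k + 1)) ((k + 1) + 1)
              ((PySem.List.pyRange s (s + (k + 1)) 1).map (fun j => PySem.List.pyGetD pa j ""))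
              (PySem.List.pyRange s (s + (k + 1)) 1)
              ((PySem.List.pyRange s (s + (k + 1)) 1).map (fun j => PySem.List.pyGetD cc j "")) := by
              rw [← hrng]; simp only [List.map_append, List.map_cons, List.map_nil]
              rw [show s + k + 1 = s + (k + 1) by ring]
          _ = _ := h3
    · have h1' : ¬ (m * k < total ∧ s + k < num) := by tauto
      rw [if_neg h1', if_neg h1]

theorem pvOuter_eq (pa : List String) (pc : List Int) (cc : List String) (num total : Int)
    (htot : 0 < total) :
    ∀ (fuel : Nat) (s : Int), 0 ≤ s → ∀ (bpa : List (List String)) (bia : List (List Int)) (bca : List (List String)),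
    pvOuterA pa pc cc num total fuel s bpa bia bca
    = (bpa ++ (pvSpansB pc num total fuel s).map (fun p => (PySem.List.pyRange p.1 p.2 1).map (fun j => PySem.List.pyGetD pa j "")),
       bia ++ (pvSpansB pc num total fuel s).map (fun p => PySem.List.pyRange p.1 p.2 1),
       bca ++ (pvSpansB pc num total fuel s).map (fun p => (PySem.List.pyRange p.1 p.2 1).map (fun j => PySem.List.pyGetD cc j ""))) := by
  intro fuel
  induction fuel with
  | zero => intro s hs bpa bia bca; simp [pvOuterA, pvSpansB]
  | succ fuel ih =>
    intro s hs bpa bia bca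
    simp only [pvOuterA, pvSpansB]
    by_cases hsn : s < num
    · rw [if_pos hsn, if_pos hsn]
      by_cases h0 : s = 0
      · subst h0
        have hinner : pvInnerA pa pc cc num total (num.toNat + 1) 0 0 0 1 [] [] []
            = ([PySem.List.pyGetD pa 0 ""], [(0 : Int)], [PySem.List.pyGetD cc 0 ""], 1) := by
          simp [pvInnerA, htot, hsn]
        rw [hinner]
        have := ih 1 (by omega) (bpa ++ [[PySem.List.pyGetD pa 0 ""]]) (bia ++ [[(0 : Int)]]) (bca ++ [[PySem.List.pyGetD cc 0 ""]])
        simp only [this]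
        have h01 : PySem.List.pyRange (0:Int) 1 1 = [(0:Int)] := by decide
        simp [h01, List.append_assoc]
      · have hs1 : 1 ≤ s := by omega
        have hstep : pvInnerA pa pc cc num total (num.toNat + 1) s 0 0 1 [] [] []
            = pvInnerA pa pc cc num total num.toNat (s + 1) (max 0 (PySem.List.pyGetD pc s 0))
                (max 0 (PySem.List.pyGetD pc s 0) * 1) (1 + 1)
                ((PySem.List.pyRange s (s + 1) 1).map (fun j => PySem.List.pyGetD pa j ""))
                (PySem.List.pyRange s (s + 1) 1)
                ((PySem.List.pyRange s (s + 1) 1).map (fun j => PySem.List.pyGetD cc j "")) := by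
          simp [pvInnerA, htot, hsn, PySem.List.pyRange_one_singleton]
          omega
        rw [hstep, pvInner_eq pa pc cc num total num.toNat s (max 0 (PySem.List.pyGetD pc s 0)) 1 hs1 le_rfl]
        have hK : (1 : Int) ≤ pvExtentB pc num total num.toNat s (max 0 (PySem.List.pyGetD pc s 0)) 1 :=
          pvExtentB_ge pc num total num.toNat s _ 1
        rw [if_neg h0]
        have := ih (s + pvExtentB pc num total num.toNat s (max 0 (PySem.List.pyGetD pc s 0)) 1) (by omega)
          (bpa ++ [(PySem.List.pyRange s (s + pvExtentB pc num total num.toNat s (max 0 (PySem.List.pyGetD pc s 0)) 1) 1).map (fun j => PySem.List.pyGetD pa j "")])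
          (bia ++ [PySem.List.pyRange s (s + pvExtentB pc num total num.toNat s (max 0 (PySem.List.pyGetD pc s 0)) 1) 1])
          (bca ++ [(PySem.List.pyRange s (s + pvExtentB pc num total num.toNat s (max 0 (PySem.List.pyGetD pc s 0)) 1) 1).map (fun j => PySem.List.pyGetD cc j "")])
        simp only [this]
        simp [List.append_assoc]
    · rw [if_neg hsn, if_neg hsn]; simp

-- spans are within [0, num]
theorem pvSpansB_bounds (pc : List Int) (num total : Int) :
    ∀ (fuel : Nat) (s : Int), 0 ≤ s → ∀ p ∈ pvSpansB pc num total fuel s,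
      0 ≤ p.1 ∧ p.1 ≤ p.2 ∧ p.2 ≤ num := by
  intro fuel
  induction fuel with
  | zero => intro s hs p hp; simp [pvSpansB] at hp
  | succ fuel ih =>
    intro s hs p hp
    simp only [pvSpansB] at hp
    by_cases hsn : s < num
    · rw [if_pos hsn] at hp
      rcases List.mem_cons.mp hp with h | h
      · subst h
        by_cases h0 : s = 0
        · subst h0; simp only [reduceIte]; omega
        · simp only [if_neg h0]
          refine ⟨hs, ?_, ?_⟩
          · have := pvExtentB_ge pc num total num.toNat s (max 0 (PySem.List.pyGetD pc s 0)) 1; omega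
          · exact pvExtentB_le pc num total num.toNat s (max 0 (PySem.List.pyGetD pc s 0)) 1 (by omega)
      · refine ih _ ?_ p h
        split_ifs with h0
        · omega
        · have := pvExtentB_ge pc num total num.toNat s (max 0 (PySem.List.pyGetD pc s 0)) 1; omega
    · rw [if_neg hsn] at hp; simp at hp

-- a slice with in-range bounds is the materialisation of the index range
theorem slice_eq_map_pyRange {α : Type} (xs : List α) (d : α) (a b : Int)
    (ha : 0 ≤ a) (hab : a ≤ b) (hb : b ≤ (xs.length : Int)) :
    PySem.List.slice xs (some a) (some b)
      = (PySem.List.pyRange a b 1).map (fun j => PySem.List.pyGetD xs j d) := by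
  have hb0 : 0 ≤ b := le_trans ha hab
  rw [PySem.List.slice_toNat xs ha hb0]
  have hfull := PySem.List.map_pyGetD_pyRange' xs d ha
  rw [PySem.List.pyRange_one_append a b (xs.length : Int) hab hb, List.map_append] at hfull
  rw [← hfull, List.take_left']
  rw [List.length_map, PySem.List.length_pyRange_one]
  omega

-- ===== VERDICT (by name: the statement is the Claim_ definition above) =====
theorem build_data_batch_spec : Claim_equal_build_data_batch := by
  intro num pa pc cc total _ hpre
  unfold Spec_build_data_batch build_data_batch build_data_batch_alt
  by_cases hnum : num ≤ 0
  · have h0 : num.toNat = 0 := by omega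
    simp [h0, pvOuterA, pvSpansB]
  · have htot : 0 < total := hpre.2.2.2.resolve_left (by omega)
    rw [pvOuter_eq pa pc cc num total htot num.toNat 0 le_rfl [] [] []]
    simp only [List.nil_append]
    refine congrArg₂ Prod.mk ?_ (congrArg₂ Prod.mk rfl ?_)
    · refine List.map_congr_left (fun p hp => ?_)
      have hb := pvSpansB_bounds pc num total num.toNat 0 le_rfl p hp
      exact (slice_eq_map_pyRange pa "" p.1 p.2 hb.1 hb.2.1 (le_trans hb.2.2 hpre.1)).symm
    · refine List.map_congr_left (fun p hp => ?_)
      have hb := pvSpansB_bounds pc num total num.toNat 0 le_rfl p hp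
      exact (slice_eq_map_pyRange cc "" p.1 p.2 hb.1 hb.2.1 (le_trans hb.2.2 hpre.2.2.1)).symm
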